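-- pv_equiv track=rewrite | github.com/mishasro72/Python_stepik | sublist.py | get_lst
-- ===== SOURCE A (Python) =====
-- def get_lst(lst):
--     new_lst= []
--     full_list = []
--     for i in range(0, len(lst)):
--         new_lst = [lst[i]]
--         for j in range(i+1, len(lst)):
--             if lst[j] > new_lst[-1]:
--                 new_lst.append(lst[j])
--             else:
--                 break
--         full_list.append(new_lst)
--     return full_list
-- ===== SOURCE B (Python) =====
-- def get_lst(lst):
--     n = len(lst)
--     run = [1] * n
--     for i in range(n - 2, -1, -1):
--         if lst[i + 1] > lst[i]:
--             run[i] = run[i + 1] + 1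
--     return [list(lst[i:i + run[i]]) for i in range(n)]
-- ===== Notes on version B (the rewrite author's own statement) =====
-- stated objective: alternative
-- what changed: B computes all maximal-run lengths in a single backward dynamic-programming pass and then emits each sublist with a C-level slice, instead of re-scanning forward element by element from every index.
import Mathlib
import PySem

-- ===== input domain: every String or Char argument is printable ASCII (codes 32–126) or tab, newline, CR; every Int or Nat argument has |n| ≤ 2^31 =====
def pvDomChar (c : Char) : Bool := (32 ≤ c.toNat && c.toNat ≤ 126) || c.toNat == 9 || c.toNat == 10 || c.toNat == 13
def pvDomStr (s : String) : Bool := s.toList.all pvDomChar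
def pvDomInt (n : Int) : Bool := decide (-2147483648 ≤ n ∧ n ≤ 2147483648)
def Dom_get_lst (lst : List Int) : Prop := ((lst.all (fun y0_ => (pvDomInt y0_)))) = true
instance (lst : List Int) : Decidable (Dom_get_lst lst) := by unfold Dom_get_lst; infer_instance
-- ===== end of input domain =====

-- B replaces A's forward re-scan from every index by one backward run-length pass plus slicing (alternative decomposition, similar cost).


-- ===== PORT A =====
-- inner 'for j' loop of A: keeps appending while lst[j] > new_lst[-1] (the previous element), else break
def pvInnerA (prev : Int) (rest : List Int) : List Int :=
  match rest with
  | [] => []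
  | x :: t => if x > prev then x :: pvInnerA x t else []

-- outer 'for i in range(len(lst))' loop: one run per starting position (= per suffix)
def get_lst (lst : List Int) : List (List Int) :=
  match lst with
  | [] => []
  | x :: t => (x :: pvInnerA x t) :: get_lst t

-- ===== PORT B =====
-- backward pass of Source B: run[i] = run[i+1]+1 if lst[i+1] > lst[i] else 1, run[n-1] = 1
def pvStep (x : Int) (t : List Int) (r : List Nat) : List Nat :=
  match r, t with
  | r0 :: rs, y :: _ => (if y > x then r0 + 1 else 1) :: r0 :: rs
  | _, _ => [1]

def pvRuns : List Int → List Nat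
  | [] => []
  | x :: t => pvStep x t (pvRuns t)

-- the final comprehension: [lst[i:i+run[i]] for i in range(n)]
def get_lst_alt (lst : List Int) : List (List Int) :=
  let run := pvRuns lst
  (List.range lst.length).map (fun i =>
    PySem.List.slice lst (some ((i : Nat) : Int)) (some (((i : Nat) : Int) + ((run.getD i 0 : Nat) : Int))))

-- ===== PRECONDITION & SPEC =====
def Spec_get_lst (lst : List Int) (out : List (List Int)) : Prop := out = get_lst_alt lst
instance (lst : List Int) (out : List (List Int)) : Decidable (Spec_get_lst lst out) := by unfold Spec_get_lst; infer_instance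

-- ===== CLAIM (what is proved, stated in full; the proofs are below) =====
def Claim_equal_get_lst : Prop := ∀ (lst : List Int), Dom_get_lst lst → Spec_get_lst lst (get_lst lst)

-- ===== LEMMAS AND PROOFS =====

-- length of the maximal strictly increasing run starting at the head
def pvRunHead : List Int → Nat
  | [] => 0
  | [_] => 1
  | x :: y :: t => if y > x then pvRunHead (y :: t) + 1 else 1

theorem pvRuns_cons : ∀ (t : List Int) (x : Int), pvRuns (x :: t) = pvRunHead (x :: t) :: pvRuns t := by
  intro t
  induction t with
  | nil => intro x; simp [pvRuns, pvStep, pvRunHead]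
  | cons y t' ih =>
    intro x
    show pvStep x (y :: t') (pvRuns (y :: t')) = _
    rw [ih y]
    simp [pvStep, pvRunHead]

theorem take_runHead : ∀ (t : List Int) (x : Int), (x :: t).take (pvRunHead (x :: t)) = x :: pvInnerA x t := by
  intro t
  induction t with
  | nil => intro x; simp [pvRunHead, pvInnerA]
  | cons y t' ih =>
    intro x
    by_cases h : y > x
    · simp [pvRunHead, pvInnerA, h, ih]
    · simp [pvRunHead, pvInnerA, h]

theorem alt_eq (l : List Int) :
    get_lst_alt l = (List.range l.length).map (fun i => (l.drop i).take ((pvRuns l).getD i 0)) := by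
  unfold get_lst_alt
  simp [PySem.List.slice_natCast_add]

theorem main_eq : ∀ (l : List Int), get_lst l = get_lst_alt l := by
  intro l
  rw [alt_eq]
  induction l with
  | nil => simp [get_lst]
  | cons x t ih =>
    simp only [get_lst, List.length_cons, List.range_succ_eq_map, List.map_cons, List.map_map, ih]
    refine congrArg₂ List.cons ?_ ?_
    · simp [pvRuns_cons, take_runHead]
    · refine List.map_congr_left ?_
      intro i _
      simp [Function.comp, pvRuns_cons]

-- ===== VERDICT (by name: the statement is the Claim_ definition above) =====
theorem get_lst_spec : Claim_equal_get_lst := by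
  intro lst _
  unfold Spec_get_lst
  exact main_eq lst
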